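-- pv_equiv track=rewrite | github.com/lilianvln/Hitman | SAT.py | varGarde
-- ===== SOURCE A (Python) =====
-- def var_guardN(N, M):
--     res = []
--     for i in range(N):
--         for j in range(M):
--             res.append(13 * (i * M + j) + 6)
--     return res
--
-- def var_guardE(N, M):
--     res = []
--     for i in range(N):
--         for j in range(M):
--             res.append(13 * (i * M + j) + 7)
--     return res
--
-- def var_guardS(N, M):
--     res = []
--     for i in range(N):
--         for j in range(M):
--             res.append(13 * (i * M + j) + 8)
--     return res
--
-- def var_guardW(N, M):
--     res = []
--     for i in range(N):
--         for j in range(M):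
--             res.append(13 * (i * M + j) + 9)
--     return res
--
-- def varGarde(N, M):
--     res = []
--     est = var_guardE(N, M)
--     nord = var_guardN(N, M)
--     sud = var_guardS(N, M)
--     ouest = var_guardW(N, M)
--     for i in range(N * M):
--         res.append(nord[i])
--         res.append(est[i])
--         res.append(sud[i])
--         res.append(ouest[i])
--     return res
-- ===== SOURCE B (Python) =====
-- def varGarde(N, M):
--     return [13 * k + d for k in range(N * M) for d in (6, 7, 8, 9)]
-- ===== Notes on version B (the rewrite author's own statement) =====
-- stated objective: simpler
-- what changed: Collapsed the four per-direction table builders and the index-zipping pass into one direct comprehension over range(N*M) emitting 13k+6..13k+9 per cell, with no intermediate lists and no indexing.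
import Mathlib
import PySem

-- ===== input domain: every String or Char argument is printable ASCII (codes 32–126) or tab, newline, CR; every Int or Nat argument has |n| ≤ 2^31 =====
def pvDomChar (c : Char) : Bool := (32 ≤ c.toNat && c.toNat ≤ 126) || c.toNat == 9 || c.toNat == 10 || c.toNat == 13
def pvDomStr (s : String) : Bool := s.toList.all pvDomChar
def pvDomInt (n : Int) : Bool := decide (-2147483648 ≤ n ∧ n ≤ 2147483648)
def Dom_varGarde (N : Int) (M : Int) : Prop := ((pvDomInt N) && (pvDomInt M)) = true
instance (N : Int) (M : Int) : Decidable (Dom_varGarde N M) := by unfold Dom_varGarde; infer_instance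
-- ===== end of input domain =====

-- B collapses A's four per-direction tables and zipping pass into one direct pass; equivalence proved on Pre_ (A raises IndexError when N < 0 and M < 0).

-- ===== PORT A =====
def var_guardN (N : Int) (M : Int) : List Int :=
  (PySem.List.pyRange 0 N 1).foldl
    (fun res i => (PySem.List.pyRange 0 M 1).foldl
      (fun res j => res ++ [13 * (i * M + j) + 6]) res) []

def var_guardE (N : Int) (M : Int) : List Int :=
  (PySem.List.pyRange 0 N 1).foldl
    (fun res i => (PySem.List.pyRange 0 M 1).foldl
      (fun res j => res ++ [13 * (i * M + j) + 7]) res) []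

def var_guardS (N : Int) (M : Int) : List Int :=
  (PySem.List.pyRange 0 N 1).foldl
    (fun res i => (PySem.List.pyRange 0 M 1).foldl
      (fun res j => res ++ [13 * (i * M + j) + 8]) res) []

def var_guardW (N : Int) (M : Int) : List Int :=
  (PySem.List.pyRange 0 N 1).foldl
    (fun res i => (PySem.List.pyRange 0 M 1).foldl
      (fun res j => res ++ [13 * (i * M + j) + 9]) res) []

def varGarde (N : Int) (M : Int) : List Int :=
  let est := var_guardE N M
  let nord := var_guardN N M
  let sud := var_guardS N M
  let ouest := var_guardW N M
  -- nord[i] etc. ported as pyGetD; exact on Pre_ (every index is in range there)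
  (PySem.List.pyRange 0 (N * M) 1).foldl
    (fun res i => res ++ [PySem.List.pyGetD nord i 0, PySem.List.pyGetD est i 0,
                          PySem.List.pyGetD sud i 0, PySem.List.pyGetD ouest i 0]) []

-- ===== PORT B =====
def varGarde_alt (N : Int) (M : Int) : List Int :=
  (PySem.List.pyRange 0 (N * M) 1).flatMap (fun k => [6, 7, 8, 9].map (fun d => 13 * k + d))

-- ===== PRECONDITION & SPEC =====
-- Pre_ excludes exactly the inputs where A raises IndexError: N and M both negative
-- (then N*M > 0 makes the zipping loop index empty helper lists).
def Pre_varGarde (N : Int) (M : Int) : Prop := ¬ (N < 0 ∧ M < 0)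
instance (N : Int) (M : Int) : Decidable (Pre_varGarde N M) := by unfold Pre_varGarde; infer_instance
def pvWitness_varGarde : Int × Int := (2, 3)

def Spec_varGarde (N : Int) (M : Int) (out : List Int) : Prop := out = varGarde_alt N M
instance (N : Int) (M : Int) (out : List Int) : Decidable (Spec_varGarde N M out) := by unfold Spec_varGarde; infer_instance

-- ===== CLAIM (what is proved, stated in full; the proofs are below) =====
def Claim_equal_varGarde : Prop := ∀ (N : Int) (M : Int), Dom_varGarde N M → Pre_varGarde N M → Spec_varGarde N M (varGarde N M)

-- ===== LEMMAS AND PROOFS =====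

-- the nested-range double loop, over naturals
theorem range_flatMap_lemma (c : Int) (n m : Nat) :
    (List.range n).flatMap (fun (i : Nat) => (List.range m).map (fun (j : Nat) => 13 * ((i : Int) * (m : Int) + (j : Int)) + c))
    = (List.range (n * m)).map (fun (k : Nat) => 13 * ((k : Int)) + c) := by
  induction n with
  | zero => simp
  | succ n ih =>
    rw [List.range_succ, List.flatMap_append, ih, Nat.succ_mul, List.range_add,
        List.map_append]
    simp only [List.flatMap_cons, List.flatMap_nil, List.append_nil, List.map_map]
    congr 1

theorem guard_map (c N M : Int) (hN : 0 ≤ N) (hM : 0 ≤ M) :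
    (PySem.List.pyRange 0 N 1).foldl
      (fun res i => (PySem.List.pyRange 0 M 1).foldl
        (fun res j => res ++ [13 * (i * M + j) + c]) res) []
    = (PySem.List.pyRange 0 (N * M) 1).map (fun k => 13 * k + c) := by
  have h1 : ∀ (res : List Int) (i : Int),
      (PySem.List.pyRange 0 M 1).foldl (fun res j => res ++ [13 * (i * M + j) + c]) res
      = res ++ (PySem.List.pyRange 0 M 1).map (fun j => 13 * (i * M + j) + c) :=
    fun res i => PySem.List.foldl_append_singleton_eq_map _ _ _
  simp only [h1]
  rw [PySem.List.foldl_append_eq_flatMap]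
  obtain ⟨n, rfl⟩ := Int.eq_ofNat_of_zero_le hN
  obtain ⟨m, rfl⟩ := Int.eq_ofNat_of_zero_le hM
  rw [PySem.List.pyRange_one 0 n, PySem.List.pyRange_one 0 m,
      PySem.List.pyRange_one 0 ((n : Int) * m)]
  simp only [Int.sub_zero, Int.toNat_natCast, zero_add, List.flatMap_map, List.map_map,
    ← Int.natCast_mul, Int.toNat_natCast, List.nil_append]
  simp only [Function.comp_def]
  push_cast
  exact range_flatMap_lemma c n m

theorem varGarde_eq_alt (N M : Int) (h : ¬ (N < 0 ∧ M < 0)) :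
    varGarde N M = varGarde_alt N M := by
  by_cases hNM : 0 ≤ N ∧ 0 ≤ M
  · obtain ⟨hN, hM⟩ := hNM
    unfold varGarde varGarde_alt
    simp only [var_guardN, var_guardE, var_guardS, var_guardW,
      guard_map _ N M hN hM]
    rw [PySem.List.foldl_append_eq_flatMap]
    simp only [List.nil_append]
    apply List.flatMap_congr
    intro i hi
    rw [PySem.List.mem_pyRange_one] at hi
    rw [PySem.List.pyGetD_map_pyRange_of_nonneg _ _ _ _ hi.1 hi.2,
        PySem.List.pyGetD_map_pyRange_of_nonneg _ _ _ _ hi.1 hi.2,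
        PySem.List.pyGetD_map_pyRange_of_nonneg _ _ _ _ hi.1 hi.2,
        PySem.List.pyGetD_map_pyRange_of_nonneg _ _ _ _ hi.1 hi.2]
    simp
  · -- one of N, M is negative, the other nonnegative: N*M ≤ 0 and all ranges are empty
    have hprod : N * M ≤ 0 := by
      rcases not_and_or.mp hNM with hN | hM
      · have hN' : N < 0 := by omega
        have hM' : 0 ≤ M := by omega
        exact Int.mul_nonpos_of_nonpos_of_nonneg (le_of_lt hN') hM'
      · have hM' : M < 0 := by omega
        have hN' : 0 ≤ N := by omega
        exact Int.mul_nonpos_of_nonneg_of_nonpos hN' (le_of_lt hM')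
    unfold varGarde varGarde_alt
    rw [PySem.List.pyRange_one_eq_nil hprod]
    simp

-- ===== VERDICT (by name: the statement is the Claim_ definition above) =====
theorem varGarde_spec : Claim_equal_varGarde := by
  intro N M _ hpre
  exact varGarde_eq_alt N M hpre
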